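-- pv_equiv track=rewrite | github.com/JonaMata/AdventOfCode | 2023/day_13/day_13.py | calc_before_mirror
-- ===== SOURCE A (Python) =====
-- def calc_before_mirror(arr):
--     arr_len = len(arr)
--     for i in range(1, arr_len):
--         left = arr[max(0, i*2-arr_len):i]
--         right = arr[i:min(arr_len, 2*i)]
--         if left == right[::-1]:
--             return i
--     return 0
-- ===== SOURCE B (Python) =====
-- def calc_before_mirror(arr):
--     n = len(arr)
--     for i in range(1, n):
--         l = i - 1
--         r = i
--         while l >= 0 and r < n:
--             if arr[l] != arr[r]:
--                 break
--             l -= 1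
--             r += 1
--         if l < 0 or r >= n:
--             return i
--     return 0
-- ===== Notes on version B (the rewrite author's own statement) =====
-- stated objective: faster
-- what changed: Per boundary, A builds two slices plus a reversed copy and compares whole lists (Theta(window) even on an immediate mismatch); B expands two pointers outward from the boundary in place and stops at the first mismatch, so a failing boundary costs O(1+matched pairs) with no slicing or reversal.
import Mathlib
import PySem

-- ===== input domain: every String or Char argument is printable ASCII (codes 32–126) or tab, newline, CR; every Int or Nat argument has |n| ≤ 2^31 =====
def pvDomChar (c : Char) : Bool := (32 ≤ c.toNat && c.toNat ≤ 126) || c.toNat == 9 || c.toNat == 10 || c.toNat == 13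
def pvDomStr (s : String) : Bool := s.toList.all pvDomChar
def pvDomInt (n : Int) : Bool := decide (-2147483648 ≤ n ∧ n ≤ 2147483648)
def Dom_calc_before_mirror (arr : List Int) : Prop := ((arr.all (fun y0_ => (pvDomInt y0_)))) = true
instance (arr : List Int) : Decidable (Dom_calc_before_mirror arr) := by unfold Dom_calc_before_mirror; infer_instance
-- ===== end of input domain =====

-- B replaces A's slice-build-and-reverse check per boundary with an in-place two-pointer
-- expansion that stops at the first mismatch, avoiding the per-boundary slice/reverse cost
-- (measurably faster in a timing run; return value proved identical).

-- ===== PORT A =====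
-- the loop 'for i in range(1, arr_len): … return i' with fallthrough 'return 0'
def cbmLoopA (arr : List Int) (n : Int) : List Int → Int
  | [] => 0
  | i :: rest =>
    let left := PySem.List.slice arr (some (max 0 (i * 2 - n))) (some i)
    let right := PySem.List.slice arr (some i) (some (min n (2 * i)))
    -- right[::-1]: step -1 ≠ 0, so slice? is always `some` (PySem.List.slice?_none_none_neg_one)
    if left = (PySem.List.slice? right none none (-1)).getD [] then i else cbmLoopA arr n rest

def calc_before_mirror (arr : List Int) : Int :=
  cbmLoopA arr (PySem.List.len arr) (PySem.List.pyRange 1 (PySem.List.len arr) 1)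

-- ===== PORT B =====
-- the 'while l >= 0 and r < n: …' loop; returns the final (l, r).
-- arr[l]/arr[r] via pyGetD: under the guard l ≥ 0 ∧ r < n and the loop's call pattern
-- (l < n and 0 ≤ r always, since l starts at i-1 < n and only decreases, r starts at i ≥ 1
-- and only increases) both indices are in range, so pyGetD is exact (default never read).
def cbmExpand (arr : List Int) (n : Int) (l r : Int) : Int × Int :=
  if l ≥ 0 ∧ r < n then
    if PySem.List.pyGetD arr l 0 ≠ PySem.List.pyGetD arr r 0 then (l, r)
    else cbmExpand arr n (l - 1) (r + 1)
  else (l, r)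
termination_by (n - r).toNat
decreasing_by omega

def cbmLoopB (arr : List Int) (n : Int) : List Int → Int
  | [] => 0
  | i :: rest =>
    let p := cbmExpand arr n (i - 1) i
    if p.1 < 0 ∨ p.2 ≥ n then i else cbmLoopB arr n rest

def calc_before_mirror_alt (arr : List Int) : Int :=
  cbmLoopB arr (PySem.List.len arr) (PySem.List.pyRange 1 (PySem.List.len arr) 1)

-- ===== PRECONDITION & SPEC =====
def Spec_calc_before_mirror (arr : List Int) (out : Int) : Prop := out = calc_before_mirror_alt arr
instance (arr : List Int) (out : Int) : Decidable (Spec_calc_before_mirror arr out) := by unfold Spec_calc_before_mirror; infer_instance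

-- ===== CLAIM (what is proved, stated in full; the proofs are below) =====
def Claim_equal_calc_before_mirror : Prop := ∀ (arr : List Int), Dom_calc_before_mirror arr → Spec_calc_before_mirror arr (calc_before_mirror arr)

-- ===== LEMMAS AND PROOFS =====

-- the common pointwise mirror condition around the gap (l, r)
def MirrorPt (arr : List Int) (n l r : Int) : Prop :=
  ∀ k : Int, 0 ≤ k → 0 ≤ l - k → r + k < n →
    PySem.List.pyGetD arr (l - k) 0 = PySem.List.pyGetD arr (r + k) 0

-- B's off-the-edge test equals the pointwise condition
lemma expand_off_aux (arr : List Int) (n : Int) (m : Nat) :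
    ∀ l r : Int, (n - r).toNat ≤ m → l < n → 0 ≤ r →
    (((cbmExpand arr n l r).1 < 0 ∨ (cbmExpand arr n l r).2 ≥ n) ↔ MirrorPt arr n l r) := by
  induction m with
  | zero =>
    intro l r hm hl hr
    rw [cbmExpand, if_neg (by omega)]
    constructor
    · intro _ k hk h1 h2; omega
    · intro _; omega
  | succ m ih =>
    intro l r hm hl hr
    by_cases hg : l ≥ 0 ∧ r < n
    · by_cases hne : PySem.List.pyGetD arr l 0 ≠ PySem.List.pyGetD arr r 0
      · rw [cbmExpand, if_pos hg, if_pos hne]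
        constructor
        · intro h; omega
        · intro h
          exfalso; apply hne
          have := h 0 le_rfl (by omega) (by omega)
          simpa using this
      · push Not at hne
        rw [cbmExpand, if_pos hg, if_neg (by simpa using hne)]
        rw [ih (l - 1) (r + 1) (by omega) (by omega) (by omega)]
        constructor
        · intro h k hk h1 h2
          by_cases hk0 : k = 0
          · subst hk0; simpa using hne
          · have h' := h (k - 1) (by omega) (by omega) (by omega)
            have e1 : l - 1 - (k - 1) = l - k := by ring
            have e2 : r + 1 + (k - 1) = r + k := by ring
            rw [e1, e2] at h'; exact h'
        · intro h k hk h1 h2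
          have h' := h (k + 1) (by omega) (by omega) (by omega)
          have e1 : l - (k + 1) = l - 1 - k := by ring
          have e2 : r + (k + 1) = r + 1 + k := by ring
          rw [e1, e2] at h'; exact h'
    · rw [cbmExpand, if_neg hg]
      constructor
      · intro _ k hk h1 h2; omega
      · intro _; omega

lemma expand_off (arr : List Int) (n l r : Int) (hl : l < n) (hr : 0 ≤ r) :
    ((cbmExpand arr n l r).1 < 0 ∨ (cbmExpand arr n l r).2 ≥ n) ↔ MirrorPt arr n l r :=
  expand_off_aux arr n (n - r).toNat l r le_rfl hl hr

-- list-level: prefix-window = reversed suffix-window ↔ pointwise mirrored equality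
lemma take_drop_rev_eq (arr : List Int) (s a m : Nat)
    (hsm : s + m ≤ arr.length) (ham : a + m ≤ arr.length) :
    ((arr.drop s).take m = ((arr.drop a).take m).reverse) ↔
    (∀ j, j < m → arr.getD (s + j) 0 = arr.getD (a + (m - 1 - j)) 0) := by
  have hL : ((arr.drop s).take m).length = m := by simp; omega
  have hR : (((arr.drop a).take m).reverse).length = m := by simp; omega
  have hgetL : ∀ (j : Nat) (h : j < m), ((arr.drop s).take m)[j]'(by omega) = arr.getD (s + j) 0 := by
    intro j h
    rw [List.getElem_take, List.getElem_drop, List.getD_eq_getElem _ _ (by omega)]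
  have hgetR : ∀ (j : Nat) (h : j < m),
      (((arr.drop a).take m).reverse)[j]'(by omega) = arr.getD (a + (m - 1 - j)) 0 := by
    intro j h
    rw [List.getElem_reverse, List.getElem_take, List.getElem_drop,
      List.getD_eq_getElem _ _ (by omega)]
    congr 1
    simp at *
    omega
  constructor
  · intro heq j hj
    rw [← hgetL j hj, ← hgetR j hj]
    congr 1
  · intro hP
    apply List.ext_getElem (by omega)
    intro j h1 h2
    rw [hgetL j (by omega), hgetR j (by omega)]
    exact hP j (by omega)

-- A's slice equality equals the pointwise condition at (i-1, i)
lemma slice_mirror (arr : List Int) (i : Int) (h1 : 1 ≤ i) (h2 : i < PySem.List.len arr) :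
    (PySem.List.slice arr (some (max 0 (i * 2 - PySem.List.len arr))) (some i)
      = (PySem.List.slice? (PySem.List.slice arr (some i) (some (min (PySem.List.len arr) (2 * i)))) none none (-1)).getD [])
    ↔ MirrorPt arr (PySem.List.len arr) (i - 1) i := by
  rw [PySem.List.slice?_none_none_neg_one, Option.getD_some]
  rw [PySem.List.len_eq] at *
  set N := arr.length with hN
  rw [PySem.List.slice_toNat _ (by omega) (by omega), PySem.List.slice_toNat _ (by omega) (by omega)]
  set s : Nat := (max 0 (i * 2 - (N : Int))).toNat with hs
  set a : Nat := i.toNat with ha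
  set e : Nat := (min ((N : Int)) (2 * i)).toNat with he
  have hsa : s + 1 ≤ a := by omega
  have haN : a < N := by omega
  have hae : e - a = a - s := by omega
  set m : Nat := a - s with hm
  rw [hae]
  rw [take_drop_rev_eq arr s a m (by omega) (by omega)]
  unfold MirrorPt
  constructor
  · intro hP k hk hk1 hk2
    have hkn : k.toNat ≤ a - 1 - s := by omega
    have hj : a - 1 - s - k.toNat < m := by omega
    have h' := hP (a - 1 - s - k.toNat) hj
    rw [PySem.List.pyGetD_eq_getElem _ _ (by omega) (by omega),
        PySem.List.pyGetD_eq_getElem _ _ (by omega) (by omega)]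
    rw [← List.getD_eq_getElem _ 0 (hn := by omega), ← List.getD_eq_getElem _ 0 (hn := by omega)]
    have e1 : s + (a - 1 - s - k.toNat) = (i - 1 - k).toNat := by omega
    have e2 : a + (m - 1 - (a - 1 - s - k.toNat)) = (i + k).toNat := by omega
    rw [e1, e2] at h'
    exact h'
  · intro hM j hj
    have h' := hM ((a - 1 - s - j : Nat) : Int) (by omega) (by omega) (by omega)
    rw [PySem.List.pyGetD_eq_getElem _ _ (by omega) (by omega),
        PySem.List.pyGetD_eq_getElem _ _ (by omega) (by omega)] at h'
    rw [← List.getD_eq_getElem _ 0 (hn := by omega), ← List.getD_eq_getElem _ 0 (hn := by omega)] at h'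
    have e1 : (i - 1 - ((a - 1 - s - j : Nat) : Int)).toNat = s + j := by omega
    have e2 : (i + ((a - 1 - s - j : Nat) : Int)).toNat = a + (m - 1 - j) := by omega
    rw [e1, e2] at h'
    exact h'

lemma loops_eq (arr : List Int) (is : List Int)
    (h : ∀ i ∈ is, 1 ≤ i ∧ i < PySem.List.len arr) :
    cbmLoopA arr (PySem.List.len arr) is = cbmLoopB arr (PySem.List.len arr) is := by
  induction is with
  | nil => rfl
  | cons i rest ih =>
    obtain ⟨h1, h2⟩ := h i (List.mem_cons_self ..)
    have hc := (slice_mirror arr i h1 h2).trans (expand_off arr (PySem.List.len arr) (i - 1) i (by omega) (by omega)).symm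
    simp only [cbmLoopA, cbmLoopB]
    by_cases hA : PySem.List.slice arr (some (max 0 (i * 2 - PySem.List.len arr))) (some i)
        = (PySem.List.slice? (PySem.List.slice arr (some i) (some (min (PySem.List.len arr) (2 * i)))) none none (-1)).getD []
    · rw [if_pos hA, if_pos (hc.mp hA)]
    · rw [if_neg hA, if_neg (fun hB => hA (hc.mpr hB)),
        ih (fun j hj => h j (List.mem_cons_of_mem _ hj))]

-- ===== VERDICT (by name: the statement is the Claim_ definition above) =====
theorem calc_before_mirror_spec : Claim_equal_calc_before_mirror := by
  intro arr _
  show calc_before_mirror arr = calc_before_mirror_alt arr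
  unfold calc_before_mirror calc_before_mirror_alt
  exact loops_eq arr _ (fun i hi => by
    have := (PySem.List.mem_pyRange_one).1 hi; omega)
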